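-- pv_equiv track=rewrite | github.com/MiriamMarinS/ProtEp | proteomicEpitopeFinder.py | occurrences_mismatch
-- ===== SOURCE A (Python) =====
-- def occurrences_mismatch(string, sub, mismatch_allowed, epitope_sequences):
--
--     epitopes = []
--     for k, v in epitope_sequences.items():
--         if v[0] not in epitopes:
--             epitopes.append(v[0])
--
--     count = 0
--     for i in range(0, len(string) - len(sub) + 1):
--         mismatch = 0
--         amplicon = string[i:i+len(sub)]
--
--         #if any(epitope == amplicon for epitope in epitopes):
--         #    continue
--         for ii in range(0, len(sub)):
--             if amplicon[ii] != sub[ii]: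
--                 mismatch += 1
--         if mismatch == mismatch_allowed:
--             count += 1
--     return(count)
-- ===== SOURCE B (Python) =====
-- def occurrences_mismatch(string, sub, mismatch_allowed, epitope_sequences):
--     n, m = len(string), len(sub)
--     counts = [0] * (n - m + 1)
--     for j in range(m):
--         ch = sub[j]
--         counts = [c + (string[i + j] != ch) for i, c in enumerate(counts)]
--     return counts.count(mismatch_allowed)
-- ===== Notes on version B (the rewrite author's own statement) =====
-- stated objective: faster
-- what changed: B swaps the loop nesting: instead of slicing out each window and counting its mismatches in an inner Python loop, it accumulates a single per-window mismatch-count array one sub-position at a time (a comprehension per sub character) and then counts entries equal to the threshold; the dead epitope-collection loop (whose v[0] raises IndexError on an empty value list, the inputs Pre_ excludes) is dropped.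
import Mathlib
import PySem

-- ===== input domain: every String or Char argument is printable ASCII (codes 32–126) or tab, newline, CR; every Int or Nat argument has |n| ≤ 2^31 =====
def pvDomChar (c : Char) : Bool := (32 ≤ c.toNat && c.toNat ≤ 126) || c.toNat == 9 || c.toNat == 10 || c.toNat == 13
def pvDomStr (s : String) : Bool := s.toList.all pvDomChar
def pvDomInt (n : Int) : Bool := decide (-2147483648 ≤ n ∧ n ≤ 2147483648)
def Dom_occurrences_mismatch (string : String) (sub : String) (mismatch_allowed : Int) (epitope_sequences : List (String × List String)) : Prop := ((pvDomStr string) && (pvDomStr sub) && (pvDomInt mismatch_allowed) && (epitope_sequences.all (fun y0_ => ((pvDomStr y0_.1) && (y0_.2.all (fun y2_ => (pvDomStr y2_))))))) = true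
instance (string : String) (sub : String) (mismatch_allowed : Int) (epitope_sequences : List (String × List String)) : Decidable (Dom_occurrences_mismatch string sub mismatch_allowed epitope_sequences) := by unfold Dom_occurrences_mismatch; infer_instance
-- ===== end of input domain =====

-- B swaps the loop nesting (per-window slice-and-scan → one mismatch-count array accumulated per
-- sub-position) and drops A's dead epitope-collection loop; same O(n*m) cost, measurably faster by
-- a timing run (constant factor). Pre_ excludes only inputs where A raises IndexError.


-- ===== PORT A =====
def occurrences_mismatch (string : String) (sub : String) (mismatch_allowed : Int) (epitope_sequences : List (String × List String)) : Int :=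
  let s := string.toList
  let p := sub.toList
  -- epitopes = []; for k, v in epitope_sequences.items(): if v[0] not in epitopes: epitopes.append(v[0])
  -- (v[0] on an empty v is an IndexError: excluded by Pre_; the list itself is never read afterwards)
  let _epitopes : List String := epitope_sequences.foldl
    (fun acc kv =>
      let v0 := PySem.List.pyGetD kv.2 0 ""
      if acc.contains v0 then acc else acc ++ [v0]) []
  -- count = 0; for i in range(0, len(string) - len(sub) + 1): …
  (PySem.List.pyRange 0 ((s.length : Int) - (p.length : Int) + 1) 1).foldl
    (fun count i =>
      let amplicon := PySem.List.slice s (some i) (some (i + (p.length : Int)))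
      let mismatch := (PySem.List.pyRange 0 (p.length : Int) 1).foldl
        (fun mm ii =>
          if PySem.List.pyGetD amplicon ii ' ' ≠ PySem.List.pyGetD p ii ' ' then mm + 1 else mm) 0
      if mismatch = mismatch_allowed then count + 1 else count) 0

-- ===== PORT B =====
def occurrences_mismatch_alt (string : String) (sub : String) (mismatch_allowed : Int) (epitope_sequences : List (String × List String)) : Int :=
  let s := string.toList
  let p := sub.toList
  -- counts = [0] * (n - m + 1)
  let counts0 : List Int := List.replicate ((s.length : Int) - (p.length : Int) + 1).toNat 0
  -- for j in range(m): ch = sub[j]; counts = [c + (string[i+j] != ch) for i, c in enumerate(counts)]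
  let counts := (PySem.List.pyRange 0 (p.length : Int) 1).foldl
    (fun counts j =>
      let ch := PySem.List.pyGetD p j ' '
      (PySem.List.enumerate counts 0).map
        (fun ic => ic.2 + (if PySem.List.pyGetD s (ic.1 + j) ' ' ≠ ch then 1 else 0))) counts0
  -- return counts.count(mismatch_allowed)
  (PySem.List.count counts mismatch_allowed : Int)

-- ===== PRECONDITION & SPEC =====
-- Pre_ excludes exactly the inputs on which A raises IndexError: an empty value list in epitope_sequences.
def Pre_occurrences_mismatch (string : String) (sub : String) (mismatch_allowed : Int) (epitope_sequences : List (String × List String)) : Prop :=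
  ∀ kv ∈ epitope_sequences, kv.2 ≠ []
instance (string : String) (sub : String) (mismatch_allowed : Int) (epitope_sequences : List (String × List String)) : Decidable (Pre_occurrences_mismatch string sub mismatch_allowed epitope_sequences) := by unfold Pre_occurrences_mismatch; infer_instance
def pvWitness_occurrences_mismatch : String × String × Int × (List (String × List String)) :=
  ("abcab", "ab", 0, [("e1", ["ab"])])

def Spec_occurrences_mismatch (string : String) (sub : String) (mismatch_allowed : Int) (epitope_sequences : List (String × List String)) (out : Int) : Prop := out = occurrences_mismatch_alt string sub mismatch_allowed epitope_sequences
instance (string : String) (sub : String) (mismatch_allowed : Int) (epitope_sequences : List (String × List String)) (out : Int) : Decidable (Spec_occurrences_mismatch string sub mismatch_allowed epitope_sequences out) := by unfold Spec_occurrences_mismatch; infer_instance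

-- ===== CLAIM (what is proved, stated in full; the proofs are below) =====
def Claim_equal_occurrences_mismatch : Prop := ∀ (string : String) (sub : String) (mismatch_allowed : Int) (epitope_sequences : List (String × List String)), Dom_occurrences_mismatch string sub mismatch_allowed epitope_sequences → Pre_occurrences_mismatch string sub mismatch_allowed epitope_sequences → Spec_occurrences_mismatch string sub mismatch_allowed epitope_sequences (occurrences_mismatch string sub mismatch_allowed epitope_sequences)
-- ===== LEMMAS AND PROOFS =====

-- number of mismatches of the window at offset i, over sub positions 0..t-1, read directly off s
def pvHam (s p : List Char) (t : Nat) (i : Int) : Int :=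
  (PySem.List.pyRange 0 (t : Int) 1).foldl
    (fun mm jj => if PySem.List.pyGetD s (i + jj) ' ' ≠ PySem.List.pyGetD p jj ' ' then mm + 1 else mm) 0

theorem pvHam_zero (s p : List Char) (i : Int) : pvHam s p 0 i = 0 := rfl

theorem pvHam_succ (s p : List Char) (t : Nat) (i : Int) :
    pvHam s p (t + 1) i =
      pvHam s p t i + (if PySem.List.pyGetD s (i + t) ' ' ≠ PySem.List.pyGetD p t ' ' then 1 else 0) := by
  unfold pvHam
  rw [show ((t + 1 : Nat) : Int) = (t : Int) + 1 by push_cast; ring,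
      PySem.List.pyRange_one_succ_right (by exact_mod_cast Nat.zero_le t)]
  rw [List.foldl_append]
  simp only [List.foldl_cons, List.foldl_nil]
  split_ifs <;> ring

theorem pvHam_inner (s p : List Char) (i : Int) (h0 : 0 ≤ i) (hub : i + (p.length : Int) ≤ (s.length : Int)) :
    (PySem.List.pyRange 0 (p.length : Int) 1).foldl
      (fun mm ii =>
        if PySem.List.pyGetD (PySem.List.slice s (some i) (some (i + (p.length : Int)))) ii ' '
             ≠ PySem.List.pyGetD p ii ' ' then mm + 1 else mm) 0
    = pvHam s p p.length i := by
  unfold pvHam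
  apply PySem.List.foldl_congr_mem
  intro acc ii hii
  rw [PySem.List.mem_pyRange_one] at hii
  have hs : PySem.List.slice s (some i) (some (i + (p.length : Int)))
      = List.take ((i + (p.length : Int)).toNat - i.toNat) (List.drop i.toNat s) :=
    PySem.List.slice_toNat s h0 (by omega)
  have hlen : (List.take ((i + (p.length : Int)).toNat - i.toNat) (List.drop i.toNat s)).length = p.length := by
    simp [List.length_take, List.length_drop]
    omega
  have h1 : PySem.List.pyGetD (PySem.List.slice s (some i) (some (i + (p.length : Int)))) ii ' '
      = PySem.List.pyGetD s (i + ii) ' ' := by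
    rw [hs, PySem.List.pyGetD_eq_getElem _ ' ' hii.1 (by rw [hlen]; exact_mod_cast hii.2),
        PySem.List.pyGetD_eq_getElem _ ' ' (by omega) (by omega)]
    rw [List.getElem_take, List.getElem_drop]
    congr 1
    omega
  rw [h1]

-- B's accumulated array after the first t sub-positions is the per-window mismatch-count table
theorem pvCounts_eq (s p : List Char) (t : Nat) :
    (PySem.List.pyRange 0 (t : Int) 1).foldl
      (fun counts j =>
        let ch := PySem.List.pyGetD p j ' '
        (PySem.List.enumerate counts 0).map
          (fun ic => ic.2 + (if PySem.List.pyGetD s (ic.1 + j) ' ' ≠ ch then 1 else 0)))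
      (List.replicate ((s.length : Int) - (p.length : Int) + 1).toNat 0)
    = (PySem.List.pyRange 0 ((((s.length : Int) - (p.length : Int) + 1).toNat : Int)) 1).map
        (fun i => pvHam s p t i) := by
  induction t with
  | zero =>
      rw [show ((0 : Nat) : Int) = 0 by norm_num, PySem.List.pyRange_one_eq_nil (le_refl 0), List.foldl_nil]
      have : (fun i => pvHam s p 0 i) = (fun _ : Int => (0 : Int)) := by
        funext i; exact pvHam_zero s p i
      rw [this, List.map_const', PySem.List.length_pyRange_one]
      congr 1
  | succ t ih =>
      rw [show ((t + 1 : Nat) : Int) = (t : Int) + 1 by push_cast; ring,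
          PySem.List.pyRange_one_succ_right (by exact_mod_cast Nat.zero_le t),
          List.foldl_append, ih]
      simp only [List.foldl_cons, List.foldl_nil]
      rw [PySem.List.enumerate_eq_map_pyRange _ (0 : Int)]
      have hlen : PySem.List.len ((PySem.List.pyRange 0 ((((s.length : Int) - (p.length : Int) + 1).toNat : Int)) 1).map
          (fun i => pvHam s p t i)) = (((s.length : Int) - (p.length : Int) + 1).toNat : Int) := by
        simp [PySem.List.len, PySem.List.length_pyRange_one]
      rw [hlen, List.map_map]
      apply List.map_congr_left
      intro i hi
      rw [PySem.List.mem_pyRange_one] at hi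
      simp only [Function.comp]
      rw [PySem.List.pyGetD_map_pyRange_of_nonneg _ _ _ _ hi.1 hi.2, pvHam_succ]

-- the two window ranges coincide (both are empty when len(string) < len(sub))
theorem pvRange_toNat (E : Int) :
    PySem.List.pyRange 0 E 1 = PySem.List.pyRange 0 ((E.toNat : Int)) 1 := by
  by_cases h : 0 ≤ E
  · rw [Int.toNat_of_nonneg h]
  · rw [PySem.List.pyRange_one_eq_nil (by omega), PySem.List.pyRange_one_eq_nil (by omega)]

theorem occurrences_mismatch_spec : Claim_equal_occurrences_mismatch := by
  intro string sub k eps _ _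
  unfold Spec_occurrences_mismatch occurrences_mismatch occurrences_mismatch_alt
  simp only []
  set s := string.toList with hs
  set p := sub.toList with hp
  rw [pvCounts_eq s p p.length, pvRange_toNat ((s.length : Int) - (p.length : Int) + 1)]
  set W : Nat := ((s.length : Int) - (p.length : Int) + 1).toNat with hW
  -- A's inner window scan is pvHam
  have hA : (PySem.List.pyRange 0 ((W : Nat) : Int) 1).foldl
      (fun count i =>
        if (PySem.List.pyRange 0 (p.length : Int) 1).foldl
            (fun mm ii =>
              if PySem.List.pyGetD (PySem.List.slice s (some i) (some (i + (p.length : Int)))) ii ' '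
                   ≠ PySem.List.pyGetD p ii ' ' then mm + 1 else mm) 0 = k
        then count + 1 else count) (0 : Int)
      = (PySem.List.pyRange 0 ((W : Nat) : Int) 1).foldl
        (fun count i => if pvHam s p p.length i = k then count + 1 else count) (0 : Int) := by
    apply PySem.List.foldl_congr_mem
    intro acc i hi
    rw [PySem.List.mem_pyRange_one] at hi
    have h0 : 0 ≤ i := hi.1
    have hub : i + (p.length : Int) ≤ (s.length : Int) := by
      have h2 := hi.2
      have h3 : ((W : Nat) : Int) ≤ max ((s.length : Int) - (p.length : Int) + 1) 0 := by
        rw [hW]; omega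
      omega
    rw [pvHam_inner s p i h0 hub]
  have hfinal : (PySem.List.pyRange 0 ((W : Nat) : Int) 1).foldl
      (fun count i => if pvHam s p p.length i = k then count + 1 else count) (0 : Int)
      = ((PySem.List.count ((PySem.List.pyRange 0 ((W : Nat) : Int) 1).map
          (fun i => pvHam s p p.length i)) k : Int)) := by
    rw [PySem.List.foldl_ite_add_one (fun i => pvHam s p p.length i = k)]
    rw [PySem.List.count_eq, List.count_eq_countP, List.countP_map]
    simp only [zero_add]
    congr 1
  exact hA.trans hfinal
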